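-- pv_equiv track=rewrite | github.com/dingchaofan/AlgorithmSolution | pythonTest/group.py | genGroupId
-- ===== SOURCE A (Python) =====
-- def genGroupId(input, group):
--     res = [0] * len(input)
--     # 第二次遍历 对输入数据进行分组
--     for input_index in range(len(input)):
--         input_arr = input[input_index]
--         for group_index in range(len(group)):
--             group_arr = group[group_index]
--             for num in input_arr:
--                 if (num in group_arr):
--                     res[input_index] = group_index + 1
--                     break
--     return res
-- ===== SOURCE B (Python) =====
-- def genGroupId(input, group):
--     # Precompute, in one pass over the groups, the last (1-based) group index
--     # containing each number; then each input row's id is the max over its numbers.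
--     last = {}
--     for gi in range(len(group)):
--         for num in group[gi]:
--             last[num] = gi + 1
--     return [max((last.get(num, 0) for num in arr), default=0) for arr in input]
-- ===== Notes on version B (the rewrite author's own statement) =====
-- stated objective: faster
-- what changed: Replaces the quadruple nested loop (every input row scanned against every group with a linear membership test) by a single pass that builds a dict num -> last group index, then takes a max of O(1) lookups per input number.
import Mathlib
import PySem

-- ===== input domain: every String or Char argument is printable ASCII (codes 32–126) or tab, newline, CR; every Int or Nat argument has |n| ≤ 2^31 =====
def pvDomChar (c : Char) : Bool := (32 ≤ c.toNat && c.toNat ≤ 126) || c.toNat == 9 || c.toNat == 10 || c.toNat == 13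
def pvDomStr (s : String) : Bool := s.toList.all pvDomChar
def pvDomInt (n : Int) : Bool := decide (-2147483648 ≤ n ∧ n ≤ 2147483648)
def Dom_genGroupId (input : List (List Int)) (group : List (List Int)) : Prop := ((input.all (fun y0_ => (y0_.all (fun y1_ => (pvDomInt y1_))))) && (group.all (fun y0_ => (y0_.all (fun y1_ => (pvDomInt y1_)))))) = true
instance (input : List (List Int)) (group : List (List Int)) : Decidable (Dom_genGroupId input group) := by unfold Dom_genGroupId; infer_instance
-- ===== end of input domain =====

-- B replaces A's quadruple nested loop by one pass building a dict num → last group index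
-- plus a max of lookups per input row (objective: faster, asymptotically).

-- ===== PORT A =====
-- inner 'for num in input_arr: if num in group_arr: res[input_index] = group_index + 1; break'
def pyInner (input_arr group_arr : List Int) (group_index input_index : Nat) (res : List Int) : List Int :=
  match input_arr with
  | [] => res
  | num :: rest =>
    if group_arr.contains num then res.set input_index ((group_index : Int) + 1)
    else pyInner rest group_arr group_index input_index res

def genGroupId (input : List (List Int)) (group : List (List Int)) : List Int :=
  (List.range input.length).foldl (fun res input_index =>
    (List.range group.length).foldl (fun res group_index =>
      pyInner (input.getD input_index []) (group.getD group_index []) group_index input_index res) res)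
    (List.replicate input.length 0)

-- ===== PORT B =====
def buildLast (group : List (List Int)) : PySem.Dict Int Int :=
  (List.range group.length).foldl (fun d gi =>
    (group.getD gi []).foldl (fun d num => d.insert num ((gi : Int) + 1)) d) PySem.Dict.empty

def genGroupId_alt (input : List (List Int)) (group : List (List Int)) : List Int :=
  let last := buildLast group
  input.map (fun arr => arr.foldl (fun acc num => max acc (last.getD num 0)) 0)

-- ===== PRECONDITION & SPEC =====
def Spec_genGroupId (input : List (List Int)) (group : List (List Int)) (out : List Int) : Prop := out = genGroupId_alt input group
instance (input : List (List Int)) (group : List (List Int)) (out : List Int) : Decidable (Spec_genGroupId input group out) := by unfold Spec_genGroupId; infer_instance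

-- ===== CLAIM (what is proved, stated in full; the proofs are below) =====
def Claim_equal_genGroupId : Prop := ∀ (input : List (List Int)) (group : List (List Int)), Dom_genGroupId input group → Spec_genGroupId input group (genGroupId input group)

-- ===== LEMMAS AND PROOFS =====

-- A's per-row result: fold over group indices keeping the last matching index + 1
def rowA (arr : List Int) (group : List (List Int)) : Int :=
  (List.range group.length).foldl
    (fun r gi => if arr.any (fun n => (group.getD gi []).contains n) then (gi : Int) + 1 else r) 0

-- last (1-based) group index containing num, 0 if none
def lnum (num : Int) (group : List (List Int)) : Int :=
  (List.range group.length).foldl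
    (fun r gi => if (group.getD gi []).contains num then (gi : Int) + 1 else r) 0

lemma pyInner_eq (arr g : List Int) (gi ii : Nat) (res : List Int) :
    pyInner arr g gi ii res =
      if arr.any (fun n => g.contains n) then res.set ii ((gi : Int) + 1) else res := by
  induction arr with
  | nil => simp [pyInner]
  | cons n rest ih =>
    simp only [pyInner, List.any_cons]
    by_cases hc : g.contains n = true
    · have hm : n ∈ g := by simpa using hc
      simp [hm]
    · have hm : n ∉ g := by simpa using hc
      simp [hm, ih]

lemma innerFold_eq (arr : List Int) (group : List (List Int)) (ii : Nat)
    (gis : List Nat) (res : List Int) (hii : ii < res.length) :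
    gis.foldl (fun res gi =>
        if arr.any (fun n => (group.getD gi []).contains n) then res.set ii ((gi : Int) + 1) else res) res =
      res.set ii (gis.foldl
        (fun r gi => if arr.any (fun n => (group.getD gi []).contains n) then (gi : Int) + 1 else r)
        (res.getD ii 0)) := by
  induction gis generalizing res with
  | nil =>
    simp only [List.foldl_nil]
    rw [List.getD_eq_getElem res 0 hii, List.set_getElem_self]
  | cons g gis ih =>
    simp only [List.foldl_cons]
    cases h : arr.any (fun n => (group.getD g []).contains n)
    · simp only [Bool.false_eq_true, if_false]
      exact ih res hii
    · simp only [if_true]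
      rw [ih _ (by simpa using hii)]
      rw [List.set_set]
      congr 1
      rw [List.getD_eq_getElem _ 0 (by simpa using hii), List.getElem_set_self]

lemma genGroupId_eq_map (input : List (List Int)) (group : List (List Int)) :
    genGroupId input group =
      (List.range input.length).map (fun i => rowA (input.getD i []) group) := by
  have key : ∀ k, k ≤ input.length →
      (List.range k).foldl (fun res input_index =>
        (List.range group.length).foldl (fun res group_index =>
          pyInner (input.getD input_index []) (group.getD group_index []) group_index input_index res) res)
        (List.replicate input.length 0) =
      (List.range input.length).map
        (fun i => if i < k then rowA (input.getD i []) group else 0) := by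
    intro k hk
    induction k with
    | zero =>
      simp [List.map_const']
    | succ k ih =>
      rw [List.range_succ, List.foldl_append, ih (by omega), List.foldl_cons, List.foldl_nil]
      simp only [pyInner_eq]
      have hlen : ((List.range input.length).map
          (fun i => if i < k then rowA (input.getD i []) group else 0)).length = input.length := by
        simp
      rw [innerFold_eq _ _ _ _ _ (by rw [hlen]; omega)]
      have hget : ((List.range input.length).map
          (fun i => if i < k then rowA (input.getD i []) group else 0)).getD k 0 = 0 := by
        rw [List.getD_eq_getElem _ 0 (by rw [hlen]; omega)]
        simp
      rw [hget]
      apply List.ext_getElem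
      · simp
      · intro j hj hj'
        have hjlen : j < input.length := by
          simpa [hlen] using hj
        rw [List.getElem_set]
        by_cases hjk : k = j
        · subst hjk
          simp [rowA]
        · simp only [hjk, if_false, List.getElem_map, List.getElem_range]
          by_cases hlt : j < k
          · simp [hlt, show j < k + 1 by omega]
          · simp [hlt, show ¬ j < k + 1 by omega]
  have hfin := key input.length le_rfl
  unfold genGroupId
  rw [hfin]
  apply List.map_congr_left
  intro i hi
  simp only [List.mem_range] at hi
  simp [hi]

lemma map_range_getD (input : List (List Int)) (f : List Int → Int) :
    (List.range input.length).map (fun i => f (input.getD i [])) = input.map f := by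
  apply List.ext_getElem
  · simp
  · intro j hj hj'
    simp only [List.getElem_map, List.getElem_range]
    congr 1
    rw [List.getD_eq_getElem _ _ (by simpa using hj')]

lemma lnum_append (num : Int) (gs : List (List Int)) (g : List Int) :
    lnum num (gs ++ [g]) =
      if g.contains num then (gs.length : Int) + 1 else lnum num gs := by
  unfold lnum
  rw [List.length_append, List.length_singleton, List.range_succ, List.foldl_append,
    List.foldl_cons, List.foldl_nil]
  have hg : (gs ++ [g]).getD gs.length [] = g := by
    rw [List.getD_eq_getElem _ _ (by simp)]
    simp
  rw [hg]
  congr 1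
  apply PySem.List.foldl_congr_mem
  intro r gi hgi
  simp only [List.mem_range] at hgi
  rw [List.getD_append _ _ _ _ hgi]

lemma rowA_append (arr : List Int) (gs : List (List Int)) (g : List Int) :
    rowA arr (gs ++ [g]) =
      if arr.any (fun n => g.contains n) then (gs.length : Int) + 1 else rowA arr gs := by
  unfold rowA
  rw [List.length_append, List.length_singleton, List.range_succ, List.foldl_append,
    List.foldl_cons, List.foldl_nil]
  have hg : (gs ++ [g]).getD gs.length [] = g := by
    rw [List.getD_eq_getElem _ _ (by simp)]
    simp
  rw [hg]
  congr 1
  apply PySem.List.foldl_congr_mem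
  intro r gi hgi
  simp only [List.mem_range] at hgi
  rw [List.getD_append _ _ _ _ hgi]

lemma lnum_bounds (num : Int) (gs : List (List Int)) :
    0 ≤ lnum num gs ∧ lnum num gs ≤ (gs.length : Int) := by
  induction gs using List.reverseRecOn with
  | nil => simp [lnum]
  | append_singleton gs g ih =>
    rw [lnum_append]
    by_cases h : g.contains num = true
    · rw [if_pos h]
      simp
      omega
    · rw [if_neg h]
      simp
      omega

lemma foldl_max_absorb (G : List (List Int)) (arr : List Int) (acc : Int)
    (h : ∀ n ∈ arr, lnum n G ≤ acc) :
    arr.foldl (fun a n => max a (lnum n G)) acc = acc := by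
  induction arr generalizing acc with
  | nil => rfl
  | cons n rest ih =>
    simp only [List.foldl_cons]
    rw [max_eq_left (h n (by simp))]
    exact ih acc (fun m hm => h m (by simp [hm]))

lemma foldl_max_step (gs : List (List Int)) (g : List Int) (arr : List Int) (acc : Int)
    (h0 : 0 ≤ acc) (h1 : acc ≤ (gs.length : Int)) :
    arr.foldl (fun a n => max a (lnum n (gs ++ [g]))) acc =
      if arr.any (fun n => g.contains n) then (gs.length : Int) + 1
      else arr.foldl (fun a n => max a (lnum n gs)) acc := by
  induction arr generalizing acc with
  | nil => simp
  | cons n rest ih =>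
    simp only [List.foldl_cons, List.any_cons]
    rw [lnum_append]
    by_cases h : g.contains n = true
    · rw [if_pos h]
      simp only [h, Bool.true_or, if_true]
      rw [max_eq_right (by omega)]
      apply foldl_max_absorb
      intro m hm
      rw [lnum_append]
      by_cases hm' : g.contains m = true
      · rw [if_pos hm']
      · rw [if_neg hm']
        have := lnum_bounds m gs
        omega
    · rw [if_neg h]
      have h' : g.contains n = false := by
        simpa using h
      simp only [h', Bool.false_or]
      have hb := lnum_bounds n gs
      exact ih (max acc (lnum n gs)) (by omega) (by omega)

lemma rowA_eq_foldl_max (arr : List Int) (gs : List (List Int)) :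
    rowA arr gs = arr.foldl (fun a n => max a (lnum n gs)) 0 := by
  induction gs using List.reverseRecOn with
  | nil =>
    rw [show rowA arr [] = 0 from rfl]
    symm
    apply foldl_max_absorb
    intro n _
    simp [lnum]
  | append_singleton gs g ih =>
    rw [rowA_append, foldl_max_step gs g arr 0 le_rfl (by positivity), ih]

lemma insert_all_getD (g : List Int) (d : PySem.Dict Int Int) (v num : Int) :
    (g.foldl (fun d n => d.insert n v) d).getD num 0 =
      if g.contains num then v else d.getD num 0 := by
  induction g generalizing d with
  | nil => simp
  | cons n rest ih =>
    simp only [List.foldl_cons]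
    rw [ih]
    by_cases h : rest.contains num = true
    · rw [if_pos h, if_pos (by simp only [List.contains_cons, h, Bool.or_true])]
    · rw [if_neg h]
      have h' : rest.contains num = false := by
        simpa using h
      rw [PySem.Dict.getD_insert]
      simp only [List.contains_cons, h', Bool.or_false]
      by_cases he : num = n <;> simp [he]

lemma buildLast_getD (group : List (List Int)) (num : Int) :
    (buildLast group).getD num 0 = lnum num group := by
  unfold buildLast
  induction group using List.reverseRecOn with
  | nil => simp [lnum]
  | append_singleton gs g ih =>
    rw [List.length_append, List.length_singleton, List.range_succ, List.foldl_append,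
      List.foldl_cons, List.foldl_nil]
    have hg : (gs ++ [g]).getD gs.length [] = g := by
      rw [List.getD_eq_getElem _ _ (by simp)]
      simp
    have hcongr : (List.range gs.length).foldl (fun d gi =>
        ((gs ++ [g]).getD gi []).foldl (fun d num => d.insert num ((gi : Int) + 1)) d)
        PySem.Dict.empty =
      (List.range gs.length).foldl (fun d gi =>
        (gs.getD gi []).foldl (fun d num => d.insert num ((gi : Int) + 1)) d)
        PySem.Dict.empty := by
      apply PySem.List.foldl_congr_mem
      intro d gi hgi
      simp only [List.mem_range] at hgi
      rw [List.getD_append _ _ _ _ hgi]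
    rw [hg, hcongr, insert_all_getD, ih, lnum_append]

-- ===== VERDICT (by name: the statement is the Claim_ definition above) =====
theorem genGroupId_spec : Claim_equal_genGroupId := by
  intro input group _
  unfold Spec_genGroupId genGroupId_alt
  rw [genGroupId_eq_map, map_range_getD input (fun arr => rowA arr group)]
  apply List.map_congr_left
  intro arr _
  rw [rowA_eq_foldl_max]
  simp only [buildLast_getD]
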